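-- pv_equiv track=rewrite | github.com/Akshattekriwal01/leetcode | Leetcode 0835. Image Overlap.py | largestOverlap1
-- ===== SOURCE A (Python) =====
-- from typing import List
--
-- def largestOverlap1(A: List[List[int]], B: List[List[int]]) -> int:
--     """
--     time: O(N^6)
--     space: O(N^2)
--     """
--     A1 = set([(r, c) for r, row in enumerate(A) for c, val in enumerate(row) if val == 1])
--     B1 = set([(r, c) for r, row in enumerate(B) for c, val in enumerate(row) if val == 1])
--     ans = 0
--     seen = {}
--     for a in A1:
--         for b in B1:
--             delta = (a[0] - b[0], a[1] - b[1])
--             if delta not in seen: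
--                 seen[delta] = sum((b[0] + delta[0], b[1] + delta[1]) in A1 for b in B1)
--                 ans = max(ans, seen[delta])
--     return ans
-- ===== SOURCE B (Python) =====
-- from typing import List
--
-- def largestOverlap1(A: List[List[int]], B: List[List[int]]) -> int:
--     a1 = [(r, c) for r, row in enumerate(A) for c, val in enumerate(row) if val == 1]
--     b1 = [(r, c) for r, row in enumerate(B) for c, val in enumerate(row) if val == 1]
--     cnt = {}
--     for a in a1:
--         for b in b1:
--             d = (a[0] - b[0], a[1] - b[1])
--             cnt[d] = cnt.get(d, 0) + 1
--     return max(cnt.values(), default=0)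
-- ===== Notes on version B (the rewrite author's own statement) =====
-- stated objective: faster
-- what changed: Instead of, for each translation delta encountered, rescanning all of B's ones and testing membership in A's ones (an inner O(N^2) sum per delta), B counts each (a-b) shift-delta over all one-pairs once in a dictionary and returns the maximum count.
import Mathlib
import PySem

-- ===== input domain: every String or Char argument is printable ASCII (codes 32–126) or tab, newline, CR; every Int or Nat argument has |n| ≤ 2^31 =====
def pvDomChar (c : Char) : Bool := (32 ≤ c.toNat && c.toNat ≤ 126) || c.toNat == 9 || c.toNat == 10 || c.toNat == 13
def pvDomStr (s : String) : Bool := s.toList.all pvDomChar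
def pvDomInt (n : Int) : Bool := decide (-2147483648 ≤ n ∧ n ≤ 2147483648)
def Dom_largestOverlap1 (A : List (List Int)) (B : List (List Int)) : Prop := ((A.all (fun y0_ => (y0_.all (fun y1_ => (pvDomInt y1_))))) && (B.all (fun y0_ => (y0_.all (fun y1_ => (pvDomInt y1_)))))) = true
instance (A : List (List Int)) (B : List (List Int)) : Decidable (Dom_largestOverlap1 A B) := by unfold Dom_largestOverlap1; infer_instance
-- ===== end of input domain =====

-- B replaces A's per-delta rescan of B's ones (an inner O(N^2) sum per translation delta) by a single
-- dictionary count of each shift-delta over all one-pairs, returning the maximum count (objective: faster).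

-- shared comprehension `[(r, c) for r, row in enumerate(g) for c, val in enumerate(row) if val == 1]`
-- (textually identical in A and B)
def pvOnes (g : List (List Int)) : List (Int × Int) :=
  (PySem.List.enumerate g).flatMap (fun rrow =>
    ((PySem.List.enumerate rrow.2).filter (fun cv => cv.2 == 1)).map (fun cv => (rrow.1, cv.1)))

-- ===== PORT A =====
def largestOverlap1 (A : List (List Int)) (B : List (List Int)) : Int :=
  let A1 : PySem.Set (Int × Int) := PySem.Set.ofList (pvOnes A)
  let B1 : PySem.Set (Int × Int) := PySem.Set.ofList (pvOnes B)
  -- for a in A1: for b in B1: … (ans, seen) is the loop state; result is order-independent (max over deltas)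
  let r := List.foldl (fun (st : Int × PySem.Dict (Int × Int) Int) a =>
    List.foldl (fun (st : Int × PySem.Dict (Int × Int) Int) b =>
      let delta : Int × Int := (a.1 - b.1, a.2 - b.2)
      if st.2.contains delta then st
      else
        let v : Int := (B1.map (fun b2 =>
          if PySem.Set.contains A1 (b2.1 + delta.1, b2.2 + delta.2) then (1 : Int) else 0)).sum
        (max st.1 v, st.2.insert delta v)) st B1) ((0 : Int), PySem.Dict.empty) A1
  r.1

-- ===== PORT B =====
def largestOverlap1_alt (A : List (List Int)) (B : List (List Int)) : Int :=
  let a1 := pvOnes A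
  let b1 := pvOnes B
  -- for a in a1: for b in b1: cnt[d] = cnt.get(d, 0) + 1
  let cnt := List.foldl (fun (cnt : PySem.Dict (Int × Int) Int) a =>
    List.foldl (fun (cnt : PySem.Dict (Int × Int) Int) b =>
      let d : Int × Int := (a.1 - b.1, a.2 - b.2)
      cnt.insert d (cnt.getD d 0 + 1)) cnt b1) PySem.Dict.empty a1
  -- max(cnt.values(), default=0)
  PySem.List.maxD cnt.values (fun x => x) 0

-- ===== PRECONDITION & SPEC =====
def Spec_largestOverlap1 (A : List (List Int)) (B : List (List Int)) (out : Int) : Prop := out = largestOverlap1_alt A B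
instance (A : List (List Int)) (B : List (List Int)) (out : Int) : Decidable (Spec_largestOverlap1 A B out) := by unfold Spec_largestOverlap1; infer_instance

-- ===== CLAIM (what is proved, stated in full; the proofs are below) =====
def Claim_equal_largestOverlap1 : Prop := ∀ (A : List (List Int)) (B : List (List Int)), Dom_largestOverlap1 A B → Spec_largestOverlap1 A B (largestOverlap1 A B)

-- ===== LEMMAS AND PROOFS =====

-- the list of all translation deltas (a - b), with multiplicity, in loop order
def pvL (xs ys : List (Int × Int)) : List (Int × Int) :=
  xs.flatMap (fun a => ys.map (fun b => (a.1 - b.1, a.2 - b.2)))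

-- the value A stores in `seen[delta]`
def pvF (xs ys : List (Int × Int)) (δ : Int × Int) : Int :=
  (ys.map (fun b2 => if PySem.Set.contains xs (b2.1 + δ.1, b2.2 + δ.2) then (1 : Int) else 0)).sum

-- A's loop body as a single step over the flattened delta list
def pvStep (xs ys : List (Int × Int)) (st : Int × PySem.Dict (Int × Int) Int) (δ : Int × Int) :
    Int × PySem.Dict (Int × Int) Int :=
  if st.2.contains δ then st
  else (max st.1 (pvF xs ys δ), st.2.insert δ (pvF xs ys δ))

lemma nodup_pvOnes (g : List (List Int)) : (pvOnes g).Nodup := by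
  unfold pvOnes
  rw [List.nodup_flatMap]
  constructor
  · intro p _hp
    have hpw : ((PySem.List.enumerate p.2).filter (fun cv => cv.2 == 1)).Pairwise
        (fun u v : Int × Int => u.1 < v.1) :=
      (PySem.List.pairwise_lt_enumerate p.2 0).filter _
    exact hpw.map _ (fun u v huv => by
      intro hEq
      rw [Prod.ext_iff] at hEq
      exact absurd hEq.2 (ne_of_lt huv))
  · refine (PySem.List.pairwise_lt_enumerate g 0).imp ?_
    intro p q hlt z hzp hzq
    simp only [List.mem_map, List.mem_filter] at hzp hzq
    obtain ⟨u, _, hu⟩ := hzp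
    obtain ⟨v, _, hv⟩ := hzq
    rw [← hu] at hv
    rw [Prod.ext_iff] at hv
    exact absurd hv.1 (ne_of_gt hlt)

lemma portA_eq (A B : List (List Int)) (hx : (pvOnes A).Nodup) (hy : (pvOnes B).Nodup) :
    largestOverlap1 A B
      = ((pvL (pvOnes A) (pvOnes B)).foldl (pvStep (pvOnes A) (pvOnes B))
          ((0 : Int), PySem.Dict.empty)).1 := by
  simp only [largestOverlap1]
  rw [PySem.Set.ofList_eq_self_of_nodup _ hx, PySem.Set.ofList_eq_self_of_nodup _ hy]
  rw [pvL, List.foldl_flatMap]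
  simp only [List.foldl_map]
  rfl

lemma portB_eq (A B : List (List Int)) :
    largestOverlap1_alt A B
      = PySem.List.maxD
          ((PySem.Set.ofList (pvL (pvOnes A) (pvOnes B))).map
            (fun k => ((List.count k (pvL (pvOnes A) (pvOnes B)) : Nat) : Int)))
          (fun x => x) 0 := by
  simp only [largestOverlap1_alt]
  have hc : (List.foldl (fun (cnt : PySem.Dict (Int × Int) Int) a =>
      List.foldl (fun (cnt : PySem.Dict (Int × Int) Int) b =>
        cnt.insert (a.1 - b.1, a.2 - b.2) (cnt.getD (a.1 - b.1, a.2 - b.2) 0 + 1)) cnt (pvOnes B))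
      PySem.Dict.empty (pvOnes A)) = PySem.Dict.counter (pvL (pvOnes A) (pvOnes B)) := by
    rw [← PySem.Dict.foldl_insert_getD_add_one_eq_counter, pvL, List.foldl_flatMap]
    simp only [List.foldl_map]
  rw [hc]
  congr 1
  simp [PySem.Dict.values, PySem.Dict.items_counter, List.map_map, Function.comp]

-- countP of an exclusive disjunction splits
lemma countP_or_exclusive {α : Type} (l : List α) (p q : α → Bool)
    (h : ∀ x ∈ l, ¬(p x = true ∧ q x = true)) :
    l.countP (fun x => p x || q x) = l.countP p + l.countP q := by
  induction l with
  | nil => simp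
  | cons x t ih =>
    have hx := h x (by simp)
    have ht : ∀ y ∈ t, ¬(p y = true ∧ q y = true) := fun y hy => h y (by simp [hy])
    simp only [List.countP_cons, ih ht]
    cases hp : p x <;> cases hq : q x <;> simp_all <;> omega

-- the value A computes for δ is exactly the multiplicity of δ among all one-pair deltas
lemma pvF_eq_count (xs ys : List (Int × Int)) (hx : xs.Nodup) (δ : Int × Int) :
    pvF xs ys δ = ((List.count δ (pvL xs ys) : Nat) : Int) := by
  rw [pvF, PySem.List.sum_map_ite_one_zero]
  congr 1
  induction xs with
  | nil => simp [pvL, PySem.Set.contains]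
  | cons a xs ih =>
    rw [List.nodup_cons] at hx
    obtain ⟨ha, hx'⟩ := hx
    have hcons : ∀ z : Int × Int,
        PySem.Set.contains (a :: xs) z = ((z == a) || PySem.Set.contains xs z) := by
      intro z
      rw [Bool.eq_iff_iff]
      simp [List.mem_cons, beq_iff_eq]
    simp only [hcons]
    rw [countP_or_exclusive _ _ _ (by
      intro b _ hb
      obtain ⟨h1, h2⟩ := hb
      rw [beq_iff_eq] at h1
      rw [PySem.Set.contains_iff] at h2
      exact ha (h1 ▸ h2))]
    have hpvl : pvL (a :: xs) ys
        = ys.map (fun b => (a.1 - b.1, a.2 - b.2)) ++ pvL xs ys := by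
      simp [pvL]
    rw [hpvl, List.count_append, ih hx']
    congr 1
    rw [List.count, List.countP_map]
    apply List.countP_congr
    intro b _
    simp only [Function.comp_apply, beq_iff_eq, Prod.ext_iff]
    omega

-- invariant of A's loop over the flattened delta list
lemma loopA (xs ys : List (Int × Int)) (L : List (Int × Int)) :
    ∀ (ans : Int) (d : PySem.Dict (Int × Int) Int),
      (∀ δ, d.contains δ = true → pvF xs ys δ ≤ ans) →
      (ans ≤ (L.foldl (pvStep xs ys) (ans, d)).1) ∧
      (∀ δ, (L.foldl (pvStep xs ys) (ans, d)).2.contains δ = true →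
          pvF xs ys δ ≤ (L.foldl (pvStep xs ys) (ans, d)).1) ∧
      (∀ δ ∈ L, (L.foldl (pvStep xs ys) (ans, d)).2.contains δ = true) ∧
      ((L.foldl (pvStep xs ys) (ans, d)).1 = ans ∨
        ∃ δ ∈ L, (L.foldl (pvStep xs ys) (ans, d)).1 = pvF xs ys δ) ∧
      (∀ δ, d.contains δ = true → (L.foldl (pvStep xs ys) (ans, d)).2.contains δ = true) := by
  induction L with
  | nil =>
    intro ans d hd
    exact ⟨le_refl _, hd, by simp, Or.inl rfl, fun δ h => h⟩
  | cons δ0 L ih =>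
    intro ans d hd
    rw [List.foldl_cons]
    by_cases hc : d.contains δ0 = true
    · have hstep : pvStep xs ys (ans, d) δ0 = (ans, d) := by simp [pvStep, hc]
      rw [hstep]
      obtain ⟨c1, c2, c3, c4, c5⟩ := ih ans d hd
      refine ⟨c1, c2, ?_, ?_, c5⟩
      · intro δ hδ
        rcases List.mem_cons.1 hδ with rfl | hδ
        · exact c5 δ hc
        · exact c3 δ hδ
      · rcases c4 with h | ⟨δ, hδ, h⟩
        · exact Or.inl h
        · exact Or.inr ⟨δ, List.mem_cons_of_mem _ hδ, h⟩
    · have hstep : pvStep xs ys (ans, d) δ0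
          = (max ans (pvF xs ys δ0), d.insert δ0 (pvF xs ys δ0)) := by
        simp [pvStep, hc]
      rw [hstep]
      have hd' : ∀ δ, (d.insert δ0 (pvF xs ys δ0)).contains δ = true →
          pvF xs ys δ ≤ max ans (pvF xs ys δ0) := by
        intro δ h
        rw [PySem.Dict.contains_insert] at h
        rcases Bool.or_eq_true_iff.1 h with h | h
        · rw [beq_iff_eq] at h
          rw [h]
          exact le_max_right _ _
        · exact le_trans (hd δ h) (le_max_left _ _)
      obtain ⟨c1, c2, c3, c4, c5⟩ := ih (max ans (pvF xs ys δ0)) (d.insert δ0 (pvF xs ys δ0)) hd'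
      refine ⟨le_trans (le_max_left _ _) c1, c2, ?_, ?_, ?_⟩
      · intro δ hδ
        rcases List.mem_cons.1 hδ with rfl | hδ
        · exact c5 δ (PySem.Dict.contains_insert_self _ _ _)
        · exact c3 δ hδ
      · rcases c4 with h | ⟨δ, hδ, h⟩
        · rcases max_choice ans (pvF xs ys δ0) with hm | hm
          · exact Or.inl (h.trans hm)
          · exact Or.inr ⟨δ0, by simp, h.trans hm⟩
        · exact Or.inr ⟨δ, List.mem_cons_of_mem _ hδ, h⟩
      · intro δ h
        apply c5
        rw [PySem.Dict.contains_insert]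
        simp [h]

-- the three facts that pin down B's result
lemma B_nonneg (L : List (Int × Int)) :
    0 ≤ PySem.List.maxD ((PySem.Set.ofList L).map (fun k => ((List.count k L : Nat) : Int))) (fun x => x) 0 := by
  rw [PySem.List.maxD]
  cases h : PySem.List.max? ((PySem.Set.ofList L).map (fun k => ((List.count k L : Nat) : Int))) (fun x => x) with
  | none => simp
  | some m =>
    simp only [Option.getD]
    obtain ⟨k, _, hk⟩ := List.mem_map.1 (PySem.List.max?_mem h)
    rw [← hk]
    exact Int.natCast_nonneg _

lemma B_isMax (L : List (Int × Int)) (δ : Int × Int) (hδ : δ ∈ L) :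
    ((List.count δ L : Nat) : Int)
      ≤ PySem.List.maxD ((PySem.Set.ofList L).map (fun k => ((List.count k L : Nat) : Int))) (fun x => x) 0 := by
  rw [PySem.List.maxD]
  have hmem : ((List.count δ L : Nat) : Int)
      ∈ (PySem.Set.ofList L).map (fun k => ((List.count k L : Nat) : Int)) :=
    List.mem_map.2 ⟨δ, (PySem.Set.mem_ofList _ _).2 hδ, rfl⟩
  cases h : PySem.List.max? ((PySem.Set.ofList L).map (fun k => ((List.count k L : Nat) : Int))) (fun x => x) with
  | none =>
    rw [PySem.List.max?_eq_none_iff] at h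
    rw [h] at hmem
    simp at hmem
  | some m =>
    simpa using PySem.List.max?_isMax h _ hmem

lemma B_cases (L : List (Int × Int)) :
    PySem.List.maxD ((PySem.Set.ofList L).map (fun k => ((List.count k L : Nat) : Int))) (fun x => x) 0 = 0 ∨
      ∃ δ ∈ L, PySem.List.maxD ((PySem.Set.ofList L).map (fun k => ((List.count k L : Nat) : Int))) (fun x => x) 0
        = ((List.count δ L : Nat) : Int) := by
  rw [PySem.List.maxD]
  cases h : PySem.List.max? ((PySem.Set.ofList L).map (fun k => ((List.count k L : Nat) : Int))) (fun x => x) with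
  | none => exact Or.inl rfl
  | some m =>
    obtain ⟨k, hk, hkm⟩ := List.mem_map.1 (PySem.List.max?_mem h)
    exact Or.inr ⟨k, (PySem.Set.mem_ofList _ _).1 hk, by simp [← hkm]⟩

-- ===== VERDICT (by name: the statement is the Claim_ definition above) =====
theorem largestOverlap1_spec : Claim_equal_largestOverlap1 := by
  intro A B _hDom
  unfold Spec_largestOverlap1
  have hx := nodup_pvOnes A
  have hy := nodup_pvOnes B
  rw [portA_eq A B hx hy, portB_eq A B]
  set L := pvL (pvOnes A) (pvOnes B) with hL
  obtain ⟨h1, h2, h3, h4, _⟩ :=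
    loopA (pvOnes A) (pvOnes B) L 0 PySem.Dict.empty
      (by intro δ h; simp [PySem.Dict.contains_empty] at h)
  apply le_antisymm
  · rcases h4 with h4 | ⟨δ, hδ, h4⟩
    · rw [h4]; exact B_nonneg L
    · rw [h4, pvF_eq_count _ _ hx]; exact B_isMax L δ hδ
  · rcases B_cases L with h | ⟨δ, hδ, h⟩
    · rw [h]; exact h1
    · rw [h, ← pvF_eq_count _ _ hx]; exact h2 δ (h3 δ hδ)
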